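-- pv_equiv track=rewrite | github.com/kartiksinghanand/python-practice-portfolio | daily_problems/day_07/problem_06.py | action_summary
-- ===== SOURCE A (Python) =====
-- from typing import List, Dict
--
-- def action_summary(actions: List[Dict]) -> Dict[str, int]:
--     users_actions : Dict[str, int] = {"total_actions":len(actions), "login_actions":0, "logout_actions": 0 }
--     for action in actions:
--         if action["action"] == "login" :
--             users_actions["login_actions"] += 1
--         elif action["action"] == "logout":
--             users_actions["logout_actions"] += 1
--
--
--     return users_actions
-- ===== SOURCE B (Python) =====
-- def action_summary(actions):
--     acts = [a["action"] for a in actions]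
--     return {
--         "total_actions": len(actions),
--         "login_actions": acts.count("login"),
--         "logout_actions": acts.count("logout"),
--     }
-- ===== Notes on version B (the rewrite author's own statement) =====
-- stated objective: idiomatic
-- what changed: Replaces the branching accumulation loop over a mutable dict with an extract-then-aggregate shape: project out all action strings once, then build the result dict directly from len() and two list.count() lookups.
import Mathlib
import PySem

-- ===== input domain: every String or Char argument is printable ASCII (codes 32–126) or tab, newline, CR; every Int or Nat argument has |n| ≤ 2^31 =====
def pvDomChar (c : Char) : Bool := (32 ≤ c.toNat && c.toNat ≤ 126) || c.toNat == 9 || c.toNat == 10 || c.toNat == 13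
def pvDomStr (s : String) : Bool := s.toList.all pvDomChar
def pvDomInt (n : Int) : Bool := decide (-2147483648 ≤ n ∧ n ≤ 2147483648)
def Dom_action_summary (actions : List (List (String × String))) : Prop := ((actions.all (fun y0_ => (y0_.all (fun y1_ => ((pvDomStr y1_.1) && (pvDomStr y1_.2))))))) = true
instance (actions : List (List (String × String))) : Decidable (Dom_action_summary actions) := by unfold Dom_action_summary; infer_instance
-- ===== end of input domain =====

-- B builds the summary by projecting the action strings once and counting; A loops with if/elif
-- over a mutable dict. Equivalence of the RETURN value on inputs where every dict has an "action" key.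

-- ===== PORT A =====
-- a["action"] is a dict lookup; under Pre_ the key is present, so getD's default is never used.
def action_summary (actions : List (List (String × String))) : List (String × Int) :=
  let init : PySem.Dict String Int :=
    PySem.Dict.mk [("total_actions", (actions.length : Int)), ("login_actions", 0), ("logout_actions", 0)]
  (actions.foldl (fun d a =>
      let act := (PySem.Dict.ofList a).getD "action" ""
      if act == "login" then d.modify "login_actions" 0 (· + 1)
      else if act == "logout" then d.modify "logout_actions" 0 (· + 1)
      else d) init).items

-- ===== PORT B =====
def action_summary_alt (actions : List (List (String × String))) : List (String × Int) :=
  let acts := actions.map (fun a => (PySem.Dict.ofList a).getD "action" "")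
  [("total_actions", (actions.length : Int)),
   ("login_actions", (acts.count "login" : Int)),
   ("logout_actions", (acts.count "logout" : Int))]

-- ===== PRECONDITION & SPEC =====
-- Pre_ excludes exactly the inputs where some dict lacks the "action" key: there a["action"]
-- raises KeyError in A (and in B alike).
def Pre_action_summary (actions : List (List (String × String))) : Prop :=
  ∀ a ∈ actions, (PySem.Dict.ofList a).contains "action" = true
instance (actions : List (List (String × String))) : Decidable (Pre_action_summary actions) := by
  unfold Pre_action_summary; infer_instance
def pvWitness_action_summary : (List (List (String × String))) := [[("action", "login")], [("action", "pause")]]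

def Spec_action_summary (actions : List (List (String × String))) (out : List (String × Int)) : Prop := out = action_summary_alt actions
instance (actions : List (List (String × String))) (out : List (String × Int)) : Decidable (Spec_action_summary actions out) := by unfold Spec_action_summary; infer_instance

-- ===== CLAIM (what is proved, stated in full; the proofs are below) =====
def Claim_equal_action_summary : Prop := ∀ (actions : List (List (String × String))), Dom_action_summary actions → Pre_action_summary actions → Spec_action_summary actions (action_summary actions)

-- ===== LEMMAS AND PROOFS =====

-- the loop invariant of A's fold: the three fixed keys keep their positions and accumulate the two counts
lemma foldA_items (l : List (List (String × String))) (n x y : Int) :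
    (l.foldl (fun d a =>
      let act := (PySem.Dict.ofList a).getD "action" ""
      if act == "login" then d.modify "login_actions" 0 (· + 1)
      else if act == "logout" then d.modify "logout_actions" 0 (· + 1)
      else d) (PySem.Dict.mk [("total_actions", n), ("login_actions", x), ("logout_actions", y)])).items
    = [("total_actions", n),
       ("login_actions", x + ((l.map (fun a => (PySem.Dict.ofList a).getD "action" "")).count "login" : Int)),
       ("logout_actions", y + ((l.map (fun a => (PySem.Dict.ofList a).getD "action" "")).count "logout" : Int))] := by
  induction l generalizing x y with
  | nil => simp
  | cons a l ih =>
    rw [List.foldl_cons, List.map_cons, List.count_cons, List.count_cons]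
    by_cases h1 : (PySem.Dict.ofList a).getD "action" "" = "login"
    · have hstep : (let act := (PySem.Dict.ofList a).getD "action" ""
          if act == "login" then (PySem.Dict.mk [("total_actions", n), ("login_actions", x), ("logout_actions", y)]).modify "login_actions" 0 (· + 1)
          else if act == "logout" then (PySem.Dict.mk [("total_actions", n), ("login_actions", x), ("logout_actions", y)]).modify "logout_actions" 0 (· + 1)
          else PySem.Dict.mk [("total_actions", n), ("login_actions", x), ("logout_actions", y)])
          = PySem.Dict.mk [("total_actions", n), ("login_actions", x + 1), ("logout_actions", y)] := by
        simp only [beq_iff_eq, h1, if_pos]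
        simp [PySem.Dict.modify, PySem.Dict.insert, PySem.Dict.getD, PySem.Dict.get?, PySem.Dict.contains]
      rw [hstep, ih]
      simp [h1]
      ring
    · by_cases h2 : (PySem.Dict.ofList a).getD "action" "" = "logout"
      · have hstep : (let act := (PySem.Dict.ofList a).getD "action" ""
            if act == "login" then (PySem.Dict.mk [("total_actions", n), ("login_actions", x), ("logout_actions", y)]).modify "login_actions" 0 (· + 1)
            else if act == "logout" then (PySem.Dict.mk [("total_actions", n), ("login_actions", x), ("logout_actions", y)]).modify "logout_actions" 0 (· + 1)
            else PySem.Dict.mk [("total_actions", n), ("login_actions", x), ("logout_actions", y)])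
            = PySem.Dict.mk [("total_actions", n), ("login_actions", x), ("logout_actions", y + 1)] := by
          simp only [beq_iff_eq, h2, if_pos]
          simp [PySem.Dict.modify, PySem.Dict.insert, PySem.Dict.getD, PySem.Dict.get?, PySem.Dict.contains]
        rw [hstep, ih]
        simp [h2]
        ring
      · have hstep : (let act := (PySem.Dict.ofList a).getD "action" ""
            if act == "login" then (PySem.Dict.mk [("total_actions", n), ("login_actions", x), ("logout_actions", y)]).modify "login_actions" 0 (· + 1)
            else if act == "logout" then (PySem.Dict.mk [("total_actions", n), ("login_actions", x), ("logout_actions", y)]).modify "logout_actions" 0 (· + 1)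
            else PySem.Dict.mk [("total_actions", n), ("login_actions", x), ("logout_actions", y)])
            = PySem.Dict.mk [("total_actions", n), ("login_actions", x), ("logout_actions", y)] := by
          simp only [beq_iff_eq]
          rw [if_neg h1, if_neg h2]
        rw [hstep, ih]
        simp [h1, h2]

-- ===== VERDICT (by name: the statement is the Claim_ definition above) =====
theorem action_summary_spec : Claim_equal_action_summary := by
  intro actions _ _
  show action_summary actions = action_summary_alt actions
  simp only [action_summary, action_summary_alt, foldA_items, zero_add]
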